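-- pv_equiv track=rewrite | github.com/Agusgonza11/DISTRIBUIDOS-TP1 | mi-generador.py | calcular_eofs
-- ===== SOURCE A (Python) =====
-- def calcular_eofs(tipo, distribucion):
--     """
--     Devuelve el número de EOF_ESPERADOS para el tipo de worker dado según la distribución de consultas.
--     """
--     eof_dict = {}
--
--     if tipo == "pnl":
--         # Para "pnl", devolvemos la cantidad de "filter" asignados a la consulta 5
--         consulta = 5
--         count = sum(1 for consultas in distribucion["filter"].values() if consulta in consultas)
--         eof_dict[consulta] = count
--
--     elif tipo == "joiner":
--         # Para "joiner", devolvemos la cantidad de "filter" asignados a la consulta 3 y a la consulta 4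
--         consultas = [3, 4]
--         for consulta in consultas:
--             count = sum(1 for consultas in distribucion["filter"].values() if consulta in consultas)
--             eof_dict[consulta] = count
--
--     elif tipo == "aggregator":
--         # Para "aggregator", devolvemos el número de workers de tipo "filter" asignados a consulta 2,
--         # el número de workers de tipo "joiner" asignados a consulta 3, 4, y el número de workers de tipo "pnl" asignados a consulta 5.
--         consultas = {
--             2: "filter",
--             3: "joiner",
--             4: "joiner",
--             5: "pnl"
--         }
--
--         for consulta, tipo_consulta in consultas.items():
--             if tipo_consulta == "filter":
--                 count = sum(1 for consultas in distribucion["filter"].values() if consulta in consultas)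
--             elif tipo_consulta == "joiner":
--                 count = sum(1 for consultas in distribucion["joiner"].values() if consulta in consultas)
--             elif tipo_consulta == "pnl":
--                 count = sum(1 for consultas in distribucion["pnl"].values() if consulta in consultas)
--             eof_dict[consulta] = count
--
--     return eof_dict
-- ===== SOURCE B (Python) =====
-- def calcular_eofs(tipo, distribucion):
--     """Build a per-worker-type occurrence table once, then answer by lookups."""
--     def tabla(wtype):
--         t = {}
--         for consultas in distribucion[wtype].values():
--             for c in set(consultas):
--                 t[c] = t.get(c, 0) + 1
--         return t
--
--     if tipo == "pnl":
--         f = tabla("filter")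
--         return {5: f.get(5, 0)}
--     if tipo == "joiner":
--         f = tabla("filter")
--         return {3: f.get(3, 0), 4: f.get(4, 0)}
--     if tipo == "aggregator":
--         f, j, p = tabla("filter"), tabla("joiner"), tabla("pnl")
--         return {2: f.get(2, 0), 3: j.get(3, 0), 4: j.get(4, 0), 5: p.get(5, 0)}
--     return {}
-- ===== Notes on version B (the rewrite author's own statement) =====
-- stated objective: alternative
-- what changed: B builds, per worker type, one occurrence table (dict consulta -> number of workers whose list contains it, via set(consultas) per worker) in a single pass and then answers by constant-time lookups, instead of A's repeated per-consulta scans over the values.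
import Mathlib
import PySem

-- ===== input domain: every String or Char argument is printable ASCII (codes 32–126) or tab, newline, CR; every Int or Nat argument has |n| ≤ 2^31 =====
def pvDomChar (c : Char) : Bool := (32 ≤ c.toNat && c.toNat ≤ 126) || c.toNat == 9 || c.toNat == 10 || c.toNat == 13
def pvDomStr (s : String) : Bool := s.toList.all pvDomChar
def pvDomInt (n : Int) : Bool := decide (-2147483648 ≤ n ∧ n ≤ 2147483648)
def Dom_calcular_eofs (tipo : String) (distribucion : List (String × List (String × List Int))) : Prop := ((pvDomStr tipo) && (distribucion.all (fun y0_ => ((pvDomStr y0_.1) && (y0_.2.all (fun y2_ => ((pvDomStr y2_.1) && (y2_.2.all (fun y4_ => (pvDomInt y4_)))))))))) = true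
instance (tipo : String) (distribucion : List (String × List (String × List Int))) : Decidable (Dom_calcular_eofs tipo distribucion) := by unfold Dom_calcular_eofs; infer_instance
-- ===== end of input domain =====

-- B replaces A's repeated per-consulta scans by one occurrence-table build per worker type followed by lookups (alternative decomposition, same results).


-- ===== PORT A =====
-- distribucion[k]: first-match association-list lookup; Pre_ guarantees the key is present, so the [] default is never used.
def pvLookup (distribucion : List (String × List (String × List Int))) (k : String) : List (String × List Int) :=
  (List.lookup k distribucion).getD []

-- sum(1 for consultas in d.values() if consulta in consultas)
def pvCountA (c : Int) (d : List (String × List Int)) : Int :=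
  ((d.map (·.2)).map (fun consultas => if c ∈ consultas then (1 : Int) else 0)).sum

def calcular_eofs (tipo : String) (distribucion : List (String × List (String × List Int))) : List (Int × Int) :=
  let eof0 : PySem.Dict Int Int := PySem.Dict.empty
  if tipo == "pnl" then
    ((eof0.insert 5 (pvCountA 5 (pvLookup distribucion "filter")))).items
  else if tipo == "joiner" then
    (([3, 4] : List Int).foldl
      (fun d c => d.insert c (pvCountA c (pvLookup distribucion "filter"))) eof0).items
  else if tipo == "aggregator" then
    (([(2, "filter"), (3, "joiner"), (4, "joiner"), (5, "pnl")] : List (Int × String)).foldl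
      (fun d p =>
        let cnt :=
          if p.2 == "filter" then pvCountA p.1 (pvLookup distribucion "filter")
          else if p.2 == "joiner" then pvCountA p.1 (pvLookup distribucion "joiner")
          else if p.2 == "pnl" then pvCountA p.1 (pvLookup distribucion "pnl")
          else 0
        d.insert p.1 cnt) eof0).items
  else []

-- ===== PORT B =====
-- one pass: for each worker's list, bump the table at each DISTINCT consulta
def pvTabla (distribucion : List (String × List (String × List Int))) (wtype : String) : PySem.Dict Int Int :=
  (((List.lookup wtype distribucion).getD []).map (·.2)).foldl
    (fun t consultas =>
      (PySem.Set.ofList consultas).foldl (fun t c => t.insert c (t.getD c 0 + 1)) t)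
    PySem.Dict.empty

def calcular_eofs_alt (tipo : String) (distribucion : List (String × List (String × List Int))) : List (Int × Int) :=
  if tipo == "pnl" then
    let f := pvTabla distribucion "filter"
    [(5, f.getD 5 0)]
  else if tipo == "joiner" then
    let f := pvTabla distribucion "filter"
    [(3, f.getD 3 0), (4, f.getD 4 0)]
  else if tipo == "aggregator" then
    let f := pvTabla distribucion "filter"
    let j := pvTabla distribucion "joiner"
    let p := pvTabla distribucion "pnl"
    [(2, f.getD 2 0), (3, j.getD 3 0), (4, j.getD 4 0), (5, p.getD 5 0)]
  else []

-- ===== PRECONDITION & SPEC =====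
-- Pre_ excludes exactly the inputs where Python A raises KeyError: the worker-type keys the chosen branch subscripts must be present.
def Pre_calcular_eofs (tipo : String) (distribucion : List (String × List (String × List Int))) : Prop :=
  ((tipo = "pnl" ∨ tipo = "joiner") → "filter" ∈ distribucion.map (·.1)) ∧
  (tipo = "aggregator" →
    "filter" ∈ distribucion.map (·.1) ∧ "joiner" ∈ distribucion.map (·.1) ∧ "pnl" ∈ distribucion.map (·.1))
instance (tipo : String) (distribucion : List (String × List (String × List Int))) : Decidable (Pre_calcular_eofs tipo distribucion) := by unfold Pre_calcular_eofs; infer_instance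

def pvWitness_calcular_eofs : String × (List (String × List (String × List Int))) :=
  ("pnl", [("filter", [("w1", [5, 3])])])

def Spec_calcular_eofs (tipo : String) (distribucion : List (String × List (String × List Int))) (out : List (Int × Int)) : Prop := out = calcular_eofs_alt tipo distribucion
instance (tipo : String) (distribucion : List (String × List (String × List Int))) (out : List (Int × Int)) : Decidable (Spec_calcular_eofs tipo distribucion out) := by unfold Spec_calcular_eofs; infer_instance

-- ===== CLAIM (what is proved, stated in full; the proofs are below) =====
def Claim_equal_calcular_eofs : Prop := ∀ (tipo : String) (distribucion : List (String × List (String × List Int))), Dom_calcular_eofs tipo distribucion → Pre_calcular_eofs tipo distribucion → Spec_calcular_eofs tipo distribucion (calcular_eofs tipo distribucion)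

-- ===== LEMMAS AND PROOFS =====

-- bumping the table at each distinct element of ws adds the 0/1 indicator of membership
theorem pvBump_getD (ws : List Int) (t : PySem.Dict Int Int) (c : Int) :
    ((PySem.Set.ofList ws).foldl (fun t c => t.insert c (t.getD c 0 + 1)) t).getD c 0
      = t.getD c 0 + (if c ∈ ws then (1 : Int) else 0) := by
  rw [PySem.Dict.getD_foldl_insert_add_one]
  have hnd := PySem.Set.nodup_ofList (xs := ws)
  by_cases h : c ∈ ws
  · rw [List.count_eq_one_of_mem hnd ((PySem.Set.mem_ofList ws c).2 h)]
    simp [h]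
  · rw [List.count_eq_zero_of_not_mem (fun hm => h ((PySem.Set.mem_ofList ws c).1 hm))]
    simp [h]

theorem pvTabla_loop_getD (l : List (List Int)) (t : PySem.Dict Int Int) (c : Int) :
    (l.foldl (fun t consultas =>
        (PySem.Set.ofList consultas).foldl (fun t c => t.insert c (t.getD c 0 + 1)) t) t).getD c 0
      = t.getD c 0 + (l.map (fun consultas => if c ∈ consultas then (1 : Int) else 0)).sum := by
  induction l generalizing t with
  | nil => simp
  | cons ws rest ih =>
    simp only [List.foldl_cons, List.map_cons, List.sum_cons, ih, pvBump_getD]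
    ring

theorem pvTabla_getD (distribucion : List (String × List (String × List Int))) (w : String) (c : Int) :
    (pvTabla distribucion w).getD c 0 = pvCountA c (pvLookup distribucion w) := by
  unfold pvTabla pvCountA pvLookup
  rw [pvTabla_loop_getD]
  simp [List.map_map]

-- ===== VERDICT (by name: the statement is the Claim_ definition above) =====
theorem calcular_eofs_spec : Claim_equal_calcular_eofs := by
  intro tipo distribucion _ _
  unfold Spec_calcular_eofs calcular_eofs calcular_eofs_alt
  split_ifs with h1 h2 h3 <;>
    simp [List.foldl, PySem.Dict.contains, PySem.Dict.empty,
      PySem.Dict.insert, pvTabla_getD]
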